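-- pv_equiv track=rewrite | github.com/Bobstin/AdventOfCode | 2023/02/02.py | validate_games
-- ===== SOURCE A (Python) =====
-- MAX_CUBES = {
--     "red": 12,
--     "green": 13,
--     "blue": 14,
-- }
--
-- def validate_games(games: dict[int, list[list[tuple[int, str]]]]) -> tuple[int, int]:
--     valid_games = []
--     game_powers = []
--
--     for game_id, pull_sets in games.items():
--         valid = True
--         min_cubes = {"red": 0, "green": 0, "blue": 0}
--         for pull_set in pull_sets:
--             for num, color in pull_set:
--                 if num > MAX_CUBES[color]:
--                     valid = False
--                 min_cubes[color] = max(min_cubes[color], num)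
--
--         if valid:
--             valid_games.append(game_id)
--
--         game_powers.append(min_cubes["red"] * min_cubes["green"] * min_cubes["blue"])
--
--     return sum(valid_games), sum(game_powers)
-- ===== SOURCE B (Python) =====
-- MAX_CUBES = {
--     "red": 12,
--     "green": 13,
--     "blue": 14,
-- }
--
-- def validate_games(games: dict[int, list[list[tuple[int, str]]]]) -> tuple[int, int]:
--     # staged passes: per game, three independent filtered max-reductions (one per color),
--     # then validity/power derived from the triples and the two sums taken by comprehensions
--     def need(pull_sets):
--         pulls = [p for ps in pull_sets for p in ps]
--         return tuple(max([0] + [n for n, c in pulls if c == color])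
--                      for color in ("red", "green", "blue"))
--
--     needs = [(gid, need(pss)) for gid, pss in games.items()]
--     id_sum = sum(gid for gid, (r, g, b) in needs
--                  if r <= MAX_CUBES["red"] and g <= MAX_CUBES["green"] and b <= MAX_CUBES["blue"])
--     power_sum = sum(r * g * b for _, (r, g, b) in needs)
--     return id_sum, power_sum
-- ===== Notes on version B (the rewrite author's own statement) =====
-- stated objective: alternative
-- what changed: B replaces A's single stateful pass per game (validity flag set inline, mutable min_cubes dict, two intermediate lists summed at the end) by staged pipelines: per game three independent filtered max-reductions (one scan per color over the flattened pulls), then validity and power derived from the (id, maxima) table and the two results taken as sum-comprehensions over it.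
-- outside the precondition, e.g. on validate_games({1: [[(3, 'purple')]]}): A raises KeyError, B returns (1, 0)
import Mathlib
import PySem

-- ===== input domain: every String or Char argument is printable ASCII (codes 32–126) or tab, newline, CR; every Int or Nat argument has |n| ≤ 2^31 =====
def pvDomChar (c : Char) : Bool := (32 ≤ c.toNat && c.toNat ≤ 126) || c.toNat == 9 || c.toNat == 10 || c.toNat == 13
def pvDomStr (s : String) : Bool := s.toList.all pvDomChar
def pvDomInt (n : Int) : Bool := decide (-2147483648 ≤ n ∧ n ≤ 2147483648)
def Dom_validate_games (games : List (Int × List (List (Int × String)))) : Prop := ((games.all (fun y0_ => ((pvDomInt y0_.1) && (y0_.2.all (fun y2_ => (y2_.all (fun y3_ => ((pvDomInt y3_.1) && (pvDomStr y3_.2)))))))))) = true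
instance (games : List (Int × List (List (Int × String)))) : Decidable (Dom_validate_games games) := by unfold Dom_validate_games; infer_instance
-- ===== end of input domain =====

-- B replaces A's single stateful pass (validity flag + mutable min_cubes dict + two appended
-- lists) by staged pipelines: per game three independent filtered max-reductions, then the two
-- sums taken over the resulting (id, maxima) table; same cost, different decomposition.

-- ===== PORT A =====
def MAX_CUBES : PySem.Dict String Int :=
  PySem.Dict.ofList [("red", 12), ("green", 13), ("blue", 14)]

-- one pull: Python's `if num > MAX_CUBES[color]: valid = False; min_cubes[color] = max(...)`.
-- MAX_CUBES[color] / min_cubes[color] are ported with getD, exact under Pre_ (key always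
-- present); Python raises KeyError outside Pre_.
def vgInner (st : Bool × PySem.Dict String Int) (p : Int × String) :
    Bool × PySem.Dict String Int :=
  let valid := if p.1 > MAX_CUBES.getD p.2 0 then false else st.1
  (valid, st.2.insert p.2 (max (st.2.getD p.2 0) p.1))

def validate_games (games : List (Int × List (List (Int × String)))) : Int × Int :=
  let res := games.foldl
    (fun (acc : List Int × List Int) g =>
      let st := g.2.foldl (fun st pullSet => pullSet.foldl vgInner st)
        (true, PySem.Dict.ofList [("red", 0), ("green", 0), ("blue", 0)])
      let validGames := if st.1 then acc.1 ++ [g.1] else acc.1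
      let gamePowers := acc.2 ++
        [st.2.getD "red" 0 * st.2.getD "green" 0 * st.2.getD "blue" 0]
      (validGames, gamePowers))
    ([], [])
  (res.1.sum, res.2.sum)

-- ===== PORT B =====
-- Source B's `max([0] + [n for n, c in pulls if c == color])`
def colorMax (pulls : List (Int × String)) (c : String) : Int :=
  ((pulls.filter (fun p => p.2 == c)).map Prod.fst).foldl max 0

-- Source B's `need(pull_sets)`: flatten, then one filtered max-reduction per color
def needOf (pull_sets : List (List (Int × String))) : Int × Int × Int :=
  let pulls := pull_sets.flatMap (fun ps => ps)
  (colorMax pulls "red", colorMax pulls "green", colorMax pulls "blue")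

def validate_games_alt (games : List (Int × List (List (Int × String)))) : Int × Int :=
  let needs := games.map (fun g => (g.1, needOf g.2))
  let idSum := ((needs.filter (fun x =>
      x.2.1 ≤ MAX_CUBES.getD "red" 0 && x.2.2.1 ≤ MAX_CUBES.getD "green" 0 &&
      x.2.2.2 ≤ MAX_CUBES.getD "blue" 0)).map Prod.fst).sum
  let powerSum := (needs.map (fun x => x.2.1 * x.2.2.1 * x.2.2.2)).sum
  (idSum, powerSum)

-- ===== PRECONDITION & SPEC =====
-- Pre_ excludes exactly the inputs on which A raises KeyError: a pull whose color is not one of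
-- the three keys of MAX_CUBES.
def Pre_validate_games (games : List (Int × List (List (Int × String)))) : Prop :=
  (games.all (fun g => g.2.all (fun ps => ps.all
    (fun p => p.2 == "red" || p.2 == "green" || p.2 == "blue")))) = true
instance (games : List (Int × List (List (Int × String)))) : Decidable (Pre_validate_games games) := by unfold Pre_validate_games; infer_instance

def pvWitness_validate_games : (List (Int × List (List (Int × String)))) :=
  [(1, [[(5, "red"), (3, "blue")], [(14, "green")]]), (2, [])]

def Spec_validate_games (games : List (Int × List (List (Int × String)))) (out : Int × Int) : Prop := out = validate_games_alt games
instance (games : List (Int × List (List (Int × String)))) (out : Int × Int) : Decidable (Spec_validate_games games out) := by unfold Spec_validate_games; infer_instance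

-- ===== CLAIM (what is proved, stated in full; the proofs are below) =====
def Claim_equal_validate_games : Prop := ∀ (games : List (Int × List (List (Int × String)))), Dom_validate_games games → Pre_validate_games games → Spec_validate_games games (validate_games games)

-- ===== LEMMAS AND PROOFS =====

-- used only by the proofs: the min_cubes dict with its three fixed keys
def mcOf (r g b : Int) : PySem.Dict String Int :=
  PySem.Dict.mk [("red", r), ("green", g), ("blue", b)]

theorem mc_init :
    PySem.Dict.ofList [("red", (0:Int)), ("green", 0), ("blue", 0)] = mcOf 0 0 0 := by
  decide

theorem mx_red : MAX_CUBES.getD "red" 0 = 12 := by decide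
theorem mx_green : MAX_CUBES.getD "green" 0 = 13 := by decide
theorem mx_blue : MAX_CUBES.getD "blue" 0 = 14 := by decide

theorem if_le (c n : Int) (v : Bool) :
    (if n > c then false else v) = (v && decide (n ≤ c)) := by
  split_ifs with h
  · simp [show ¬(n ≤ c) from by omega]
  · simp [show n ≤ c from by omega]

theorem step_red (v : Bool) (r g b n : Int) :
    vgInner (v, mcOf r g b) (n, "red") = (v && decide (n ≤ 12), mcOf (max r n) g b) := by
  show (if n > MAX_CUBES.getD "red" 0 then false else v,
    (mcOf r g b).insert "red" (max ((mcOf r g b).getD "red" 0) n)) = _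
  rw [show (mcOf r g b).insert "red" (max ((mcOf r g b).getD "red" 0) n) = mcOf (max r n) g b
    from rfl, mx_red, if_le]

theorem step_green (v : Bool) (r g b n : Int) :
    vgInner (v, mcOf r g b) (n, "green") = (v && decide (n ≤ 13), mcOf r (max g n) b) := by
  show (if n > MAX_CUBES.getD "green" 0 then false else v,
    (mcOf r g b).insert "green" (max ((mcOf r g b).getD "green" 0) n)) = _
  rw [show (mcOf r g b).insert "green" (max ((mcOf r g b).getD "green" 0) n) = mcOf r (max g n) b
    from rfl, mx_green, if_le]

theorem step_blue (v : Bool) (r g b n : Int) :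
    vgInner (v, mcOf r g b) (n, "blue") = (v && decide (n ≤ 14), mcOf r g (max b n)) := by
  show (if n > MAX_CUBES.getD "blue" 0 then false else v,
    (mcOf r g b).insert "blue" (max ((mcOf r g b).getD "blue" 0) n)) = _
  rw [show (mcOf r g b).insert "blue" (max ((mcOf r g b).getD "blue" 0) n) = mcOf r g (max b n)
    from rfl, mx_blue, if_le]

-- proof-side: the per-color filtered max-reductions with an arbitrary start
def cMaxFrom (pulls : List (Int × String)) (c : String) (a : Int) : Int :=
  ((pulls.filter (fun p => p.2 == c)).map Prod.fst).foldl max a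

theorem cMaxFrom_cons_eq (pulls : List (Int × String)) (c : String) (n a : Int) :
    cMaxFrom ((n, c) :: pulls) c a = cMaxFrom pulls c (max a n) := by
  simp [cMaxFrom]

theorem cMaxFrom_cons_ne (pulls : List (Int × String)) (c c' : String) (n a : Int)
    (h : (c' == c) = false) :
    cMaxFrom ((n, c') :: pulls) c a = cMaxFrom pulls c a := by
  simp [cMaxFrom, h]

-- A's inner double loop, flattened, computes: valid && all-pulls-within-limit, and the three
-- per-color filtered maxima.
theorem inner_eq (ps : List (Int × String))
    (hv : ∀ p ∈ ps, p.2 = "red" ∨ p.2 = "green" ∨ p.2 = "blue")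
    (v : Bool) (r g b : Int) :
    ps.foldl vgInner (v, mcOf r g b) =
      (v && ps.all (fun p => decide (p.1 ≤ MAX_CUBES.getD p.2 0)),
       mcOf (cMaxFrom ps "red" r) (cMaxFrom ps "green" g) (cMaxFrom ps "blue" b)) := by
  induction ps generalizing v r g b with
  | nil => simp [cMaxFrom]
  | cons p ps ih =>
    have hp := hv p (List.mem_cons_self ..)
    have hps : ∀ q ∈ ps, q.2 = "red" ∨ q.2 = "green" ∨ q.2 = "blue" :=
      fun q hq => hv q (List.mem_cons_of_mem _ hq)
    obtain ⟨n, c⟩ := p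
    simp only at hp
    rcases hp with h | h | h <;> subst h
    · rw [List.foldl_cons, step_red, ih hps,
        cMaxFrom_cons_eq, cMaxFrom_cons_ne _ _ _ _ _ (by decide),
        cMaxFrom_cons_ne _ _ _ _ _ (by decide)]
      simp [mx_red, Bool.and_assoc]
    · rw [List.foldl_cons, step_green, ih hps,
        cMaxFrom_cons_eq, cMaxFrom_cons_ne _ _ _ _ _ (by decide),
        cMaxFrom_cons_ne _ _ _ _ _ (by decide)]
      simp [mx_green, Bool.and_assoc]
    · rw [List.foldl_cons, step_blue, ih hps,
        cMaxFrom_cons_eq, cMaxFrom_cons_ne _ _ _ _ _ (by decide),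
        cMaxFrom_cons_ne _ _ _ _ _ (by decide)]
      simp [mx_blue, Bool.and_assoc]

-- validity via the maxima equals validity via the per-pull checks
theorem maxes_le (ps : List (Int × String))
    (hv : ∀ p ∈ ps, p.2 = "red" ∨ p.2 = "green" ∨ p.2 = "blue")
    (r g b : Int) :
    (cMaxFrom ps "red" r ≤ 12 ∧ cMaxFrom ps "green" g ≤ 13 ∧ cMaxFrom ps "blue" b ≤ 14) ↔
      ((r ≤ 12 ∧ g ≤ 13 ∧ b ≤ 14) ∧
        ps.all (fun p => decide (p.1 ≤ MAX_CUBES.getD p.2 0)) = true) := by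
  induction ps generalizing r g b with
  | nil => simp [cMaxFrom]
  | cons p ps ih =>
    have hp := hv p (List.mem_cons_self ..)
    have hps : ∀ q ∈ ps, q.2 = "red" ∨ q.2 = "green" ∨ q.2 = "blue" :=
      fun q hq => hv q (List.mem_cons_of_mem _ hq)
    obtain ⟨n, c⟩ := p
    simp only at hp
    rcases hp with h | h | h <;> subst h
    · rw [cMaxFrom_cons_eq, cMaxFrom_cons_ne _ _ _ _ _ (by decide),
        cMaxFrom_cons_ne _ _ _ _ _ (by decide), List.all_cons, ih hps]
      simp only [mx_red, max_le_iff, Bool.and_eq_true, decide_eq_true_eq]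
      tauto
    · rw [cMaxFrom_cons_eq, cMaxFrom_cons_ne _ _ _ _ _ (by decide),
        cMaxFrom_cons_ne _ _ _ _ _ (by decide), List.all_cons, ih hps]
      simp only [mx_green, max_le_iff, Bool.and_eq_true, decide_eq_true_eq]
      tauto
    · rw [cMaxFrom_cons_eq, cMaxFrom_cons_ne _ _ _ _ _ (by decide),
        cMaxFrom_cons_ne _ _ _ _ _ (by decide), List.all_cons, ih hps]
      simp only [mx_blue, max_le_iff, Bool.and_eq_true, decide_eq_true_eq]
      tauto

-- A's nested loop over pull sets is the loop over the flattened pulls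
theorem nested_eq_flat (pss : List (List (Int × String))) (st : Bool × PySem.Dict String Int) :
    pss.foldl (fun st pullSet => pullSet.foldl vgInner st) st =
      (pss.flatMap (fun ps => ps)).foldl vgInner st := by
  induction pss generalizing st with
  | nil => rfl
  | cons ps pss ih => simp [List.foldl_append, ih]

-- proof-side names for A's loop body and the per-game quantities (phrased via B's needOf)
def stepA (acc : List Int × List Int) (g : Int × List (List (Int × String))) :
    List Int × List Int :=
  let st := g.2.foldl (fun st pullSet => pullSet.foldl vgInner st)
    (true, PySem.Dict.ofList [("red", 0), ("green", 0), ("blue", 0)])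
  let validGames := if st.1 then acc.1 ++ [g.1] else acc.1
  let gamePowers := acc.2 ++
    [st.2.getD "red" 0 * st.2.getD "green" 0 * st.2.getD "blue" 0]
  (validGames, gamePowers)

def flatG (g : Int × List (List (Int × String))) : List (Int × String) :=
  g.2.flatMap (fun ps => ps)
def okG (g : Int × List (List (Int × String))) : Bool :=
  (needOf g.2).1 ≤ 12 && (needOf g.2).2.1 ≤ 13 && (needOf g.2).2.2 ≤ 14
def pwG (g : Int × List (List (Int × String))) : Int :=
  (needOf g.2).1 * (needOf g.2).2.1 * (needOf g.2).2.2

theorem needOf_eq (g : Int × List (List (Int × String))) :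
    needOf g.2 = (cMaxFrom (flatG g) "red" 0, cMaxFrom (flatG g) "green" 0,
      cMaxFrom (flatG g) "blue" 0) := rfl

theorem stepA_eq (g : Int × List (List (Int × String)))
    (hvg : ∀ p ∈ flatG g, p.2 = "red" ∨ p.2 = "green" ∨ p.2 = "blue") (la lb : List Int) :
    stepA (la, lb) g = ((if okG g then la ++ [g.1] else la), lb ++ [pwG g]) := by
  unfold stepA
  dsimp only
  rw [nested_eq_flat, mc_init,
    show List.flatMap (fun ps => ps) g.2 = flatG g from rfl, inner_eq _ hvg true 0 0 0]
  have hok : okG g = (flatG g).all (fun p => decide (p.1 ≤ MAX_CUBES.getD p.2 0)) := by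
    have := maxes_le (flatG g) hvg 0 0 0
    simp only [okG, needOf_eq]
    by_cases h : (flatG g).all (fun p => decide (p.1 ≤ MAX_CUBES.getD p.2 0)) = true
    · rw [h]
      have h3 := this.mpr ⟨⟨by norm_num, by norm_num, by norm_num⟩, h⟩
      simp only [Bool.and_eq_true, decide_eq_true_eq]
      exact ⟨⟨by exact h3.1, h3.2.1⟩, h3.2.2⟩
    · simp only [Bool.not_eq_true] at h
      rw [h, Bool.eq_false_iff]
      intro hc
      simp only [Bool.and_eq_true, decide_eq_true_eq] at hc
      exact absurd (this.mp ⟨hc.1.1, hc.1.2, hc.2⟩).2 (by simp [h])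
  rw [hok]
  rfl
theorem pre_head (g : Int × List (List (Int × String)))
    (games : List (Int × List (List (Int × String))))
    (hv : Pre_validate_games (g :: games)) :
    (∀ p ∈ flatG g, p.2 = "red" ∨ p.2 = "green" ∨ p.2 = "blue") ∧
      Pre_validate_games games := by
  simp only [Pre_validate_games, List.all_cons, Bool.and_eq_true] at hv ⊢
  refine ⟨?_, hv.2⟩
  intro p hp
  simp only [flatG, List.mem_flatMap] at hp
  obtain ⟨ps, hps, hp⟩ := hp
  have := (List.all_eq_true.mp ((List.all_eq_true.mp hv.1) ps hps)) p hp
  simp only [Bool.or_eq_true, beq_iff_eq] at this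
  tauto

-- B's two staged sums, named for the induction
def idSumB (games : List (Int × List (List (Int × String)))) : Int :=
  (((games.map (fun g => (g.1, needOf g.2))).filter (fun x =>
      x.2.1 ≤ MAX_CUBES.getD "red" 0 && x.2.2.1 ≤ MAX_CUBES.getD "green" 0 &&
      x.2.2.2 ≤ MAX_CUBES.getD "blue" 0)).map Prod.fst).sum
def pwSumB (games : List (Int × List (List (Int × String)))) : Int :=
  ((games.map (fun g => (g.1, needOf g.2))).map (fun x => x.2.1 * x.2.2.1 * x.2.2.2)).sum

theorem idSumB_cons (g : Int × List (List (Int × String)))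
    (games : List (Int × List (List (Int × String)))) :
    idSumB (g :: games) = (if okG g then g.1 else 0) + idSumB games := by
  simp only [idSumB, okG, List.map_cons, List.filter_cons, mx_red, mx_green, mx_blue]
  by_cases h : ((needOf g.2).1 ≤ 12 && (needOf g.2).2.1 ≤ 13 && (needOf g.2).2.2 ≤ 14) = true
  · simp [h]
  · simp only [Bool.not_eq_true] at h
    simp [h]

theorem pwSumB_cons (g : Int × List (List (Int × String)))
    (games : List (Int × List (List (Int × String)))) :
    pwSumB (g :: games) = pwG g + pwSumB games := by
  simp [pwSumB, pwG]

theorem outer_eq (games : List (Int × List (List (Int × String))))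
    (hv : Pre_validate_games games) (la lb : List Int) :
    ((games.foldl stepA (la, lb)).1.sum, (games.foldl stepA (la, lb)).2.sum) =
      (la.sum + idSumB games, lb.sum + pwSumB games) := by
  induction games generalizing la lb with
  | nil => simp [idSumB, pwSumB]
  | cons g games ih =>
    obtain ⟨hvg, hv2⟩ := pre_head g games hv
    rw [List.foldl_cons, stepA_eq g hvg, ih hv2, idSumB_cons, pwSumB_cons]
    simp only [Prod.mk.injEq]
    constructor
    · by_cases h : okG g <;> simp [h, List.sum_append] <;> ring_nf
    · simp [List.sum_append]; ring

-- ===== VERDICT (by name: the statement is the Claim_ definition above) =====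
theorem validate_games_spec : Claim_equal_validate_games := by
  intro games _ hpre
  show validate_games games = validate_games_alt games
  show ((games.foldl stepA ([], [])).1.sum, (games.foldl stepA ([], [])).2.sum) =
    (idSumB games, pwSumB games)
  rw [outer_eq games hpre [] []]
  simp
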